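-- pv_equiv track=rewrite | github.com/kimjune01/june.kim | worklog/temporal-spanner2.py | reverse_binary_construction
-- ===== SOURCE A (Python) =====
-- def reverse_binary_construction(n):
--     """
--     Reverse of binary interleave: recurse first, then cross edges.
--     This forces journeys to "commit" to a subtree before crossing.
--     """
--     edges = {}
--
--     def assign(vertices, time_start):
--         if len(vertices) <= 1:
--             return time_start
--         mid = len(vertices) // 2
--         left = vertices[:mid]
--         right = vertices[mid:]
--         t = time_start
--         # First recurse
--         t = assign(left, t)
--         t = assign(right, t)
--         # Then cross edges
--         for u in left:
--             for v in right:
--                 edge = (min(u,v), max(u,v))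
--                 edges[edge] = t
--                 t += 1
--         return t
--
--     assign(list(range(n)), 1)
--     return edges
-- ===== SOURCE B (Python) =====
-- def reverse_binary_construction(n):
--     """Iterative version: explicit stack of interval frames, post-order combine."""
--     edges = {}
--     t = 1
--     stack = [("split", 0, n)]
--     while stack:
--         frame = stack.pop()
--         if frame[0] == "split":
--             _, lo, hi = frame
--             if hi - lo <= 1:
--                 continue
--             mid = lo + (hi - lo) // 2
--             stack.append(("combine", lo, mid, hi))
--             stack.append(("split", mid, hi))
--             stack.append(("split", lo, mid))
--         else:
--             _, lo, mid, hi = frame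
--             for u in range(lo, mid):
--                 for v in range(mid, hi):
--                     edges[(u, v)] = t
--                     t += 1
--     return edges
-- ===== Notes on version B (the rewrite author's own statement) =====
-- stated objective: alternative
-- what changed: Replaces the nested-closure recursion over list slices with an explicit stack of [lo,hi) interval frames processed in post-order (a 'combine' frame emits the cross edges after both halves), with a running time counter instead of threaded return values.
import Mathlib
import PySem

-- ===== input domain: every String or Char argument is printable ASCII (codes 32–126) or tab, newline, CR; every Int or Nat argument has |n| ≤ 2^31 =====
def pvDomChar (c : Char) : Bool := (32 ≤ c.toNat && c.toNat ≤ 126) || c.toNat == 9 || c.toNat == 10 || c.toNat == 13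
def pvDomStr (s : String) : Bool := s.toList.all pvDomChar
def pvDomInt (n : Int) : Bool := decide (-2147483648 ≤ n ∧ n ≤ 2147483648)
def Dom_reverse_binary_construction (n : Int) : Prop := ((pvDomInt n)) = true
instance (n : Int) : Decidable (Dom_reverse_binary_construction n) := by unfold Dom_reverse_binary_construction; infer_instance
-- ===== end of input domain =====

-- B replaces the nested-closure recursion with an explicit stack of interval frames
-- processed in post-order (objective: alternative decomposition, same cost).

-- ===== PORT A =====
theorem pvA_dec_take (vertices : List Int) (h : ¬ vertices.length ≤ 1) :
    (vertices.take (vertices.length / 2)).length < vertices.length := by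
  simp only [List.length_take]; omega

theorem pvA_dec_drop (vertices : List Int) (h : ¬ vertices.length ≤ 1) :
    (vertices.drop (vertices.length / 2)).length < vertices.length := by
  simp only [List.length_drop]; omega

-- A's inner 'assign': state is (t, edges); 'edges' is A's closure dict threaded through.
def pvA_assign (vertices : List Int) (time_start : Int)
    (edges : PySem.Dict (Int × Int) Int) : Int × PySem.Dict (Int × Int) Int :=
  if h : vertices.length ≤ 1 then (time_start, edges)
  else
    let mid := vertices.length / 2
    let left := vertices.take mid      -- vertices[:mid], 0 ≤ mid ≤ len: exact
    let right := vertices.drop mid     -- vertices[mid:]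
    let r1 := pvA_assign left time_start edges
    let r2 := pvA_assign right r1.1 r1.2
    -- for u in left: for v in right: edges[(min u v, max u v)] = t; t += 1
    left.foldl (fun st u =>
      right.foldl (fun (st : Int × PySem.Dict (Int × Int) Int) v =>
        (st.1 + 1, st.2.insert (min u v, max u v) st.1)) st) r2
termination_by vertices.length
decreasing_by
  · exact pvA_dec_take vertices h
  · exact pvA_dec_drop vertices h

def reverse_binary_construction (n : Int) : List (Int × Int × Int) :=
  let r := pvA_assign (PySem.List.pyRange 0 n 1) 1 PySem.Dict.empty
  -- dict keyed by the pair (u, v) rendered as flat triples (u, v, t) per the type convention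
  r.2.items.map (fun p => (p.1.1, p.1.2, p.2))

-- ===== PORT B =====
inductive PvFrame
  | split (lo hi : Int)
  | combine (lo mid hi : Int)
deriving DecidableEq, Repr

def pvPhi : PvFrame → Nat
  | .split lo hi => 3 ^ (hi - lo).toNat
  | .combine _ _ _ => 0

-- fuel bound for B's while loop: each iteration strictly decreases this measure
def pvMeasure (stack : List PvFrame) : Nat := stack.length + (stack.map pvPhi).sum

def pvMid (lo hi : Int) : Int := lo + PySem.Int.floordiv (hi - lo) 2

-- the combine frame's nested for-loops (edges[(u, v)] = t; t += 1)
def pvB_cross (lo mid hi : Int) (st : Int × PySem.Dict (Int × Int) Int) :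
    Int × PySem.Dict (Int × Int) Int :=
  (PySem.List.pyRange lo mid 1).foldl (fun st u =>
    (PySem.List.pyRange mid hi 1).foldl (fun (st : Int × PySem.Dict (Int × Int) Int) v =>
      (st.1 + 1, st.2.insert (u, v) st.1)) st) st

-- B's while loop over the explicit stack; state is (t, edges).
-- The fuel argument only makes the loop total: pvB_fuel_irrel below shows any
-- sufficient fuel (the caller passes pvMeasure of the initial stack) gives the same run.
def pvB_loop : Nat → List PvFrame → Int × PySem.Dict (Int × Int) Int → PySem.Dict (Int × Int) Int
  | 0, _, st => st.2
  | _ + 1, [], st => st.2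
  | fuel + 1, .split lo hi :: rest, st =>
    if hi - lo ≤ 1 then pvB_loop fuel rest st
    else pvB_loop fuel (.split lo (pvMid lo hi) :: .split (pvMid lo hi) hi
                         :: .combine lo (pvMid lo hi) hi :: rest) st
  | fuel + 1, .combine lo mid hi :: rest, st => pvB_loop fuel rest (pvB_cross lo mid hi st)

def reverse_binary_construction_alt (n : Int) : List (Int × Int × Int) :=
  (pvB_loop (pvMeasure [.split 0 n]) [.split 0 n] (1, PySem.Dict.empty)).items.map
    (fun p => (p.1.1, p.1.2, p.2))

-- ===== PRECONDITION & SPEC =====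
def Spec_reverse_binary_construction (n : Int) (out : List (Int × Int × Int)) : Prop := out = reverse_binary_construction_alt n
instance (n : Int) (out : List (Int × Int × Int)) : Decidable (Spec_reverse_binary_construction n out) := by unfold Spec_reverse_binary_construction; infer_instance

-- ===== CLAIM (what is proved, stated in full; the proofs are below) =====
def Claim_equal_reverse_binary_construction : Prop := ∀ (n : Int), Dom_reverse_binary_construction n → Spec_reverse_binary_construction n (reverse_binary_construction n)

-- ===== LEMMAS AND PROOFS =====

theorem pvPow3 (a b : Nat) (ha : 1 ≤ a) (hb : 1 ≤ b) : 3 ^ a + 3 ^ b + 3 ≤ 3 ^ (a + b) := by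
  have hx : 3 ≤ 3 ^ a := by calc 3 = 3 ^ 1 := rfl
                                 _ ≤ 3 ^ a := Nat.pow_le_pow_right (by omega) ha
  have hy : 3 ≤ 3 ^ b := by calc 3 = 3 ^ 1 := rfl
                                 _ ≤ 3 ^ b := Nat.pow_le_pow_right (by omega) hb
  have h1 : 3 * 3 ^ a ≤ 3 ^ a * 3 ^ b :=
    le_of_le_of_eq (Nat.mul_le_mul_right (3 ^ a) hy) (Nat.mul_comm _ _)
  have h2 : 3 * 3 ^ b ≤ 3 ^ a * 3 ^ b := Nat.mul_le_mul_right (3 ^ b) hx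
  rw [pow_add]
  generalize 3 ^ a * 3 ^ b = z at h1 h2 ⊢
  omega

theorem pvB_dec_pop (f : PvFrame) (rest : List PvFrame) : pvMeasure rest < pvMeasure (f :: rest) := by
  simp only [pvMeasure, List.map_cons, List.sum_cons, List.length_cons]; omega

theorem pvMid_eq (lo hi : Int) (_h : ¬ hi - lo ≤ 1) : pvMid lo hi = lo + (hi - lo) / 2 := by
  unfold pvMid; rw [PySem.Int.floordiv_eq_ediv_of_pos (by omega)]

theorem pvB_dec_split (lo hi : Int) (rest : List PvFrame) (h : ¬ hi - lo ≤ 1) :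
    pvMeasure (.split lo (pvMid lo hi) :: .split (pvMid lo hi) hi
      :: .combine lo (pvMid lo hi) hi :: rest)
    < pvMeasure (.split lo hi :: rest) := by
  simp only [pvMeasure, List.map_cons, List.sum_cons, List.length_cons, pvPhi]
  have hq := pvMid_eq lo hi h
  have h1 : (pvMid lo hi - lo).toNat + (hi - pvMid lo hi).toNat = (hi - lo).toNat := by
    rw [hq]; omega
  have h2 : 1 ≤ (pvMid lo hi - lo).toNat := by rw [hq]; omega
  have h3 : 1 ≤ (hi - pvMid lo hi).toNat := by rw [hq]; omega
  have := pvPow3 _ _ h2 h3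
  rw [h1] at this
  omega

theorem pvB_nil (f : Nat) (st : Int × PySem.Dict (Int × Int) Int) :
    pvB_loop f [] st = st.2 := by cases f <;> rfl

theorem pvMeasure_cons_pos (f : PvFrame) (rest : List PvFrame) :
    1 ≤ pvMeasure (f :: rest) := by
  simp only [pvMeasure, List.length_cons]; omega

-- any fuel at least the measure of the stack gives the same run
theorem pvB_fuel_irrel (f1 : Nat) : ∀ (f2 : Nat) (stack : List PvFrame)
    (st : Int × PySem.Dict (Int × Int) Int),
    pvMeasure stack ≤ f1 → pvMeasure stack ≤ f2 →
    pvB_loop f1 stack st = pvB_loop f2 stack st := by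
  induction f1 with
  | zero =>
    intro f2 stack st h1 h2
    cases stack with
    | nil => rw [pvB_nil, pvB_nil]
    | cons f rest => exact absurd (le_trans (pvMeasure_cons_pos f rest) h1) (by omega)
  | succ f1 ih =>
    intro f2 stack st h1 h2
    cases stack with
    | nil => rw [pvB_nil, pvB_nil]
    | cons f rest =>
      have hpos := pvMeasure_cons_pos f rest
      cases f2 with
      | zero => exact absurd (le_trans hpos h2) (by omega)
      | succ f2 =>
        cases f with
        | split lo hi =>
          by_cases hle : hi - lo ≤ 1
          · simp only [pvB_loop, if_pos hle]
            have hd := pvB_dec_pop (PvFrame.split lo hi) rest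
            exact ih f2 rest st (by omega) (by omega)
          · simp only [pvB_loop, if_neg hle]
            have hd := pvB_dec_split lo hi rest hle
            exact ih f2 _ st (by omega) (by omega)
        | combine lo mid hi =>
          simp only [pvB_loop]
          have hd := pvB_dec_pop (PvFrame.combine lo mid hi) rest
          exact ih f2 rest _ (by omega) (by omega)

-- The cross-edge folds agree: for u in [lo,mid), v in [mid,hi) we have u < v,
-- so A's (min u v, max u v) key is B's (u, v).
theorem pv_cross_eq (lo mid hi : Int) (st : Int × PySem.Dict (Int × Int) Int) :
    pvB_cross lo mid hi st
  = (PySem.List.pyRange lo mid 1).foldl (fun st u =>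
      (PySem.List.pyRange mid hi 1).foldl (fun (st : Int × PySem.Dict (Int × Int) Int) v =>
        (st.1 + 1, st.2.insert (min u v, max u v) st.1)) st) st := by
  unfold pvB_cross
  apply PySem.List.foldl_congr_mem
  intro acc u hu
  apply PySem.List.foldl_congr_mem
  intro acc' v hv
  have hu' : u < mid := (PySem.List.mem_pyRange_one.mp hu).2
  have hv' : mid ≤ v := (PySem.List.mem_pyRange_one.mp hv).1
  have huv : u < v := lt_of_lt_of_le hu' hv'
  rw [min_eq_left huv.le, max_eq_right huv.le]

-- Main bridge: processing a split frame (with sufficient fuel) equals running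
-- A's assign on that interval, then continuing with the rest of the stack.
theorem pvB_split_eq (lo hi : Int) (rest : List PvFrame)
    (st : Int × PySem.Dict (Int × Int) Int) (fuel : Nat)
    (hf : pvMeasure (.split lo hi :: rest) ≤ fuel) :
    pvB_loop fuel (.split lo hi :: rest) st
      = pvB_loop (pvMeasure rest) rest
          (pvA_assign (PySem.List.pyRange lo hi 1) st.1 st.2) := by
  have hpos := pvMeasure_cons_pos (PvFrame.split lo hi) rest
  obtain ⟨f, rfl⟩ : ∃ f, fuel = f + 1 := ⟨fuel - 1, by omega⟩
  by_cases hle : hi - lo ≤ 1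
  · rw [pvA_assign]
    rw [dif_pos (by simp [PySem.List.length_pyRange_one]; omega)]
    simp only [pvB_loop, if_pos hle]
    have hd := pvB_dec_pop (PvFrame.split lo hi) rest
    exact pvB_fuel_irrel f (pvMeasure rest) rest st (by omega) (by omega)
  · have hq := pvMid_eq lo hi hle
    have hlo : lo ≤ pvMid lo hi := by rw [hq]; omega
    have hhi : pvMid lo hi ≤ hi := by rw [hq]; omega
    have hsplit : PySem.List.pyRange lo hi 1
        = PySem.List.pyRange lo (pvMid lo hi) 1 ++ PySem.List.pyRange (pvMid lo hi) hi 1 :=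
      PySem.List.pyRange_one_append lo (pvMid lo hi) hi hlo hhi
    have hlen : (PySem.List.pyRange lo hi 1).length / 2
        = (PySem.List.pyRange lo (pvMid lo hi) 1).length := by
      simp only [PySem.List.length_pyRange_one]
      rw [hq]; omega
    have htake : (PySem.List.pyRange lo hi 1).take ((PySem.List.pyRange lo hi 1).length / 2)
        = PySem.List.pyRange lo (pvMid lo hi) 1 := by
      rw [hlen, hsplit, List.take_left]
    have hdrop : (PySem.List.pyRange lo hi 1).drop ((PySem.List.pyRange lo hi 1).length / 2)
        = PySem.List.pyRange (pvMid lo hi) hi 1 := by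
      rw [hlen, hsplit, List.drop_left]
    have hd := pvB_dec_split lo hi rest hle
    simp only [pvB_loop, if_neg hle]
    rw [pvB_split_eq lo (pvMid lo hi) _ st f (by omega)]
    rw [pvB_split_eq (pvMid lo hi) hi _ _
      (pvMeasure (PvFrame.split (pvMid lo hi) hi :: PvFrame.combine lo (pvMid lo hi) hi :: rest))
      (by omega)]
    have hcomb : pvMeasure (PvFrame.combine lo (pvMid lo hi) hi :: rest) = pvMeasure rest + 1 := by
      simp only [pvMeasure, List.map_cons, List.sum_cons, List.length_cons, pvPhi]; omega
    rw [hcomb]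
    simp only [pvB_loop]
    rw [pv_cross_eq]
    conv_rhs => rw [pvA_assign]
    rw [dif_neg (by simp [PySem.List.length_pyRange_one]; omega)]
    simp only [htake, hdrop]
termination_by (hi - lo).toNat
decreasing_by
  · rw [hq]; omega
  · rw [hq]; omega

-- ===== VERDICT (by name: the statement is the Claim_ definition above) =====
theorem reverse_binary_construction_spec : Claim_equal_reverse_binary_construction := by
  intro n _
  unfold Spec_reverse_binary_construction reverse_binary_construction reverse_binary_construction_alt
  rw [pvB_split_eq 0 n [] (1, PySem.Dict.empty) _ (le_refl _)]
  rfl
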